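-- pv_equiv track=rewrite | github.com/Cyzzz19/midi-generator | harmonic_val.py | tokens_to_notes
-- ===== SOURCE A (Python) =====
-- PAD = 0
--
-- BOS = 1
--
-- EOS = 2
--
-- SEP = 3
--
-- MAX_TIME_SHIFT_BUCKET = 10
--
-- MAX_DURATION_BUCKET = 10
--
-- def dequantize_bucket_to_time(bucket_idx):
--     return 2 ** bucket_idx
--
-- def single_token_to_event(token_id):
--     if token_id < 4:
--         return None
--     token_id -= 4
--     pitch = token_id // ((MAX_TIME_SHIFT_BUCKET + 1) * (MAX_DURATION_BUCKET + 1))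
--     token_id %= (MAX_TIME_SHIFT_BUCKET + 1) * (MAX_DURATION_BUCKET + 1)
--     ts_bucket = token_id // (MAX_DURATION_BUCKET + 1)
--     dur_bucket = token_id % (MAX_DURATION_BUCKET + 1)
--     return pitch, dequantize_bucket_to_time(ts_bucket), dequantize_bucket_to_time(dur_bucket)
--
-- def tokens_to_notes(tokens):
--     """将 token 序列转为 (pitch, start_tick, end_tick) 列表"""
--     notes = []
--     current_tick = 0
--     for token_id in tokens:
--         if token_id in (BOS, EOS, PAD, SEP):
--             continue
--         event = single_token_to_event(token_id)
--         if event is None: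
--             continue
--         pitch, time_shift, duration = event
--         start_tick = current_tick + time_shift
--         end_tick = start_tick + duration
--         notes.append((pitch + 21, start_tick, end_tick))
--         current_tick = start_tick
--     return notes
-- ===== SOURCE B (Python) =====
-- # Build-then-prefix-sum pipeline: decode the valid tokens into (pitch, shift, duration)
-- # triples first, running-sum the shifts, then zip the two lists into notes.
--
-- def _decode(t):
--     t -= 4
--     pitch, rest = divmod(t, 121)
--     ts_b, dur_b = divmod(rest, 11)
--     return pitch, 1 << ts_b, 1 << dur_b
--
-- def _prefix_sums(xs):
--     total = 0
--     out = []
--     for x in xs: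
--         total += x
--         out.append(total)
--     return out
--
-- def tokens_to_notes(tokens):
--     events = [_decode(t) for t in tokens if t >= 4]
--     starts = _prefix_sums([ts for _, ts, _ in events])
--     return [(p + 21, s, s + d) for (p, _, d), s in zip(events, starts)]
-- ===== Notes on version B (the rewrite author's own statement) =====
-- stated objective: alternative
-- what changed: Replaces the fused stateful accumulator loop (current_tick threaded while appending notes) with a build-then-prefix-sum pipeline: filter-and-decode all valid tokens into triples, compute start ticks as a running sum of the shifts, then zip the triples with their starts.
import Mathlib
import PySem

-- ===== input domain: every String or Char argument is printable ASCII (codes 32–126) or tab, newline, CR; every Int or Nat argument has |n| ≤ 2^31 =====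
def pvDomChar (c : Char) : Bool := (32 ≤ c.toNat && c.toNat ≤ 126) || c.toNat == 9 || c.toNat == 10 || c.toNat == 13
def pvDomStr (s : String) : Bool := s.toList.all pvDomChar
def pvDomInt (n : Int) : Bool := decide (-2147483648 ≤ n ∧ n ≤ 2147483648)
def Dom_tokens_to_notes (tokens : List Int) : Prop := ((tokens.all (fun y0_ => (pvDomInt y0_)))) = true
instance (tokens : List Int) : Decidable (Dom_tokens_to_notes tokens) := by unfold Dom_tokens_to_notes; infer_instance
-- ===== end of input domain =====

-- B replaces A's fused accumulator loop by a decode / prefix-sum / zip pipeline; alternative decomposition, same cost.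

-- ===== PORT A =====
-- 2 ** bucket_idx; every call site passes a nonnegative bucket (a // or % by a positive number
-- of a nonnegative argument), where 2 ^ b.toNat is exact
def dequantize_bucket_to_time (bucket_idx : Int) : Int := 2 ^ bucket_idx.toNat

def single_token_to_event (token_id : Int) : Option (Int × Int × Int) :=
  if token_id < 4 then none
  else
    let t := token_id - 4
    let pitch := PySem.Int.floordiv t ((10 + 1) * (10 + 1))
    let t2 := PySem.Int.mod t ((10 + 1) * (10 + 1))
    let ts_bucket := PySem.Int.floordiv t2 (10 + 1)
    let dur_bucket := PySem.Int.mod t2 (10 + 1)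
    some (pitch, dequantize_bucket_to_time ts_bucket, dequantize_bucket_to_time dur_bucket)

-- loop body of A's for-loop, named for the port
def aStep (st : List (Int × Int × Int) × Int) (token_id : Int) : List (Int × Int × Int) × Int :=
  if token_id = 1 ∨ token_id = 2 ∨ token_id = 0 ∨ token_id = 3 then st
  else
    match single_token_to_event token_id with
    | none => st
    | some (pitch, time_shift, duration) =>
      let start_tick := st.2 + time_shift
      let end_tick := start_tick + duration
      (st.1 ++ [(pitch + 21, start_tick, end_tick)], start_tick)

def tokens_to_notes (tokens : List Int) : List (Int × Int × Int) :=
  (tokens.foldl aStep ([], 0)).1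

-- ===== PORT B =====
-- divmod(t, 121); divmod(rest, 11); 1 << b = 2 ^ b, exact since the buckets are nonnegative here
def bDecode (t : Int) : Int × Int × Int :=
  let t := t - 4
  let pitch := PySem.Int.floordiv t 121
  let rest := PySem.Int.mod t 121
  let ts_b := PySem.Int.floordiv rest 11
  let dur_b := PySem.Int.mod rest 11
  (pitch, 2 ^ ts_b.toNat, 2 ^ dur_b.toNat)

def bPrefixSums (xs : List Int) : List Int :=
  (xs.foldl (fun (st : Int × List Int) x => (st.1 + x, st.2 ++ [st.1 + x])) (0, [])).2

def tokens_to_notes_alt (tokens : List Int) : List (Int × Int × Int) :=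
  let events := (tokens.filter (fun t => 4 ≤ t)).map bDecode
  let starts := bPrefixSums (events.map (fun e => e.2.1))
  (events.zip starts).map (fun es => (es.1.1 + 21, es.2, es.2 + es.1.2.2))

-- ===== PRECONDITION & SPEC =====
def Spec_tokens_to_notes (tokens : List Int) (out : List (Int × Int × Int)) : Prop := out = tokens_to_notes_alt tokens
instance (tokens : List Int) (out : List (Int × Int × Int)) : Decidable (Spec_tokens_to_notes tokens out) := by unfold Spec_tokens_to_notes; infer_instance

-- ===== CLAIM (what is proved, stated in full; the proofs are below) =====
def Claim_equal_tokens_to_notes : Prop := ∀ (tokens : List Int), Dom_tokens_to_notes tokens → Spec_tokens_to_notes tokens (tokens_to_notes tokens)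

-- ===== LEMMAS AND PROOFS =====

-- reference recursive form: notes emitted from `tokens` starting at tick `tick`
def spine : List Int → Int → List (Int × Int × Int)
  | [], _ => []
  | t :: ts, tick =>
    if t < 4 then spine ts tick
    else
      let e := bDecode t
      (e.1 + 21, tick + e.2.1, tick + e.2.1 + e.2.2) :: spine ts (tick + e.2.1)

lemma aStep_skip (st : List (Int × Int × Int) × Int) (t : Int) (h : t < 4) : aStep st t = st := by
  by_cases hc : t = 1 ∨ t = 2 ∨ t = 0 ∨ t = 3
  · simp [aStep, hc]
  · simp [aStep, hc, single_token_to_event, h]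

lemma aStep_note (st : List (Int × Int × Int) × Int) (t : Int) (h : ¬ t < 4) :
    aStep st t = (st.1 ++ [((bDecode t).1 + 21, st.2 + (bDecode t).2.1,
        st.2 + (bDecode t).2.1 + (bDecode t).2.2)], st.2 + (bDecode t).2.1) := by
  have hc : ¬(t = 1 ∨ t = 2 ∨ t = 0 ∨ t = 3) := by omega
  simp [aStep, hc, single_token_to_event, h, bDecode, dequantize_bucket_to_time]

lemma aLoop_eq_spine (tokens : List Int) : ∀ (notes : List (Int × Int × Int)) (tick : Int),
    (tokens.foldl aStep (notes, tick)).1 = notes ++ spine tokens tick := by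
  induction tokens with
  | nil => intro notes tick; simp [spine]
  | cons t ts ih =>
    intro notes tick
    by_cases h : t < 4
    · rw [List.foldl_cons, aStep_skip _ _ h, ih, spine, if_pos h]
    · rw [List.foldl_cons, aStep_note _ _ h, ih, spine, if_neg h]
      simp

-- B's prefix-sum loop, characterised with a running offset
lemma bPrefixSums_loop (xs : List Int) : ∀ (tot : Int) (acc : List Int),
    (xs.foldl (fun (st : Int × List Int) x => (st.1 + x, st.2 ++ [st.1 + x])) (tot, acc)).2
      = acc ++ xs.foldr (fun x r tick => (tick + x) :: r (tick + x)) (fun _ => []) tot := by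
  induction xs with
  | nil => intro tot acc; simp
  | cons x xs ih => intro tot acc; simp [List.foldl, ih, List.append_assoc]

-- B's zip pipeline, generalised over the start offset, equals the spine
lemma bPipe_eq_spine (tokens : List Int) : ∀ (tick : Int),
    (((tokens.filter (fun t => 4 ≤ t)).map bDecode).zip
        (((tokens.filter (fun t => 4 ≤ t)).map bDecode).map (fun e => e.2.1)
          |>.foldr (fun x r t => (t + x) :: r (t + x)) (fun _ => []) tick)).map
      (fun es => (es.1.1 + 21, es.2, es.2 + es.1.2.2))
    = spine tokens tick := by
  induction tokens with
  | nil => intro tick; simp [spine]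
  | cons t ts ih =>
    intro tick
    by_cases h : t < 4
    · have h4 : ¬ (4 ≤ t) := by omega
      rw [List.filter_cons, spine]
      simp only [decide_eq_true_eq, if_neg h4, if_pos h]
      exact ih tick
    · have h4 : 4 ≤ t := by omega
      rw [List.filter_cons, spine]
      simp only [decide_eq_true_eq, if_pos h4, if_neg h, List.map_cons, List.foldr_cons,
        List.zip_cons_cons, List.map_cons]
      exact congrArg _ (ih (tick + (bDecode t).2.1))

-- ===== VERDICT (by name: the statement is the Claim_ definition above) =====
theorem tokens_to_notes_spec : Claim_equal_tokens_to_notes := by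
  intro tokens _
  show tokens_to_notes tokens = tokens_to_notes_alt tokens
  rw [tokens_to_notes, aLoop_eq_spine tokens [] 0, tokens_to_notes_alt]
  simp only [bPrefixSums]
  rw [bPrefixSums_loop _ 0 []]
  simp only [List.nil_append]
  exact (bPipe_eq_spine tokens 0).symm ▸ rfl
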